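-- pv_equiv track=rewrite | github.com/auroradebellevue/GoGAutomaticComputations | Multiplier.py | wd_len
-- ===== SOURCE A (Python) =====
-- def wd_len(word):
--     """
--     Determine the length of a word by deleting the numbers and calculating
--     the length of the new string.
--
--     Parameters
--     ----------
--     word : string over the alphabet (A_v \cup {stable letters})^{+/- 1}
--
--     Returns
--     -------
--     n : the length of the alphabet (A_v \cup {stable letters})^{+/- 1}
--
--     """
--     temp = word
--     nums = ["0", "1", "2", "3", "4", "5", "6", "7", "8", "9"]
--     #find length of string without the numbers
--     for i in nums:
--         temp = temp.replace(i, str())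
--     n = len(temp)
--     #check for IdWord
--     if word =="IdWord":
--         n=0
--     return n
-- ===== SOURCE B (Python) =====
-- def wd_len(word):
--     n = sum(1 for c in word if c not in "0123456789")
--     if word == "IdWord":
--         n = 0
--     return n
-- ===== Notes on version B (the rewrite author's own statement) =====
-- stated objective: simpler
-- what changed: Replaces the ten successive str.replace passes (each rebuilding an intermediate string) by a single pass that counts the non-digit characters, keeping the IdWord override.
import Mathlib
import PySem

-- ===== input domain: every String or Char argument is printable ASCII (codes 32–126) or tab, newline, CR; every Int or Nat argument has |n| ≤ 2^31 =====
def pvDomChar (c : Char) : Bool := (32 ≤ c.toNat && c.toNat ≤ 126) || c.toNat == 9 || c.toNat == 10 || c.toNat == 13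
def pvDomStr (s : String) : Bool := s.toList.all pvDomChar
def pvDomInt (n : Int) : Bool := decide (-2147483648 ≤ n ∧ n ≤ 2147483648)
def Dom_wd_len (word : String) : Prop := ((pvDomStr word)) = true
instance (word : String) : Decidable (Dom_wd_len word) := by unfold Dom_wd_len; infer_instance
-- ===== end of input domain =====

-- B replaces A's ten successive str.replace passes by a single count of non-digit characters (simpler, one pass; the IdWord override is kept).


-- ===== PORT A =====
def wd_len (word : String) : Int :=
  let nums : List String := ["0","1","2","3","4","5","6","7","8","9"]
  let temp := nums.foldl (fun t i => PySem.Str.replace t i "") word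
  let n : Int := PySem.Str.len temp
  if word == "IdWord" then 0 else n

-- ===== PORT B =====
def wd_len_alt (word : String) : Int :=
  let n : Int := (word.toList.countP (fun c => !("0123456789".toList.contains c)) : Nat)
  if word == "IdWord" then 0 else n

-- ===== PRECONDITION & SPEC =====
def Spec_wd_len (word : String) (out : Int) : Prop := out = wd_len_alt word
instance (word : String) (out : Int) : Decidable (Spec_wd_len word out) := by unfold Spec_wd_len; infer_instance

-- ===== CLAIM (what is proved, stated in full; the proofs are below) =====
def Claim_equal_wd_len : Prop := ∀ (word : String), Dom_wd_len word → Spec_wd_len word (wd_len word)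

-- ===== LEMMAS AND PROOFS =====

-- the inner worker of PySem.Chars.replace, specialised to a one-char pattern and empty replacement, is filter
lemma go_single (d : Char) : ∀ (fuel : Nat) (l acc : List Char), l.length ≤ fuel →
    PySem.Chars.replace.go [d] [] fuel l acc = acc.reverse ++ l.filter (· ≠ d) := by
  intro fuel
  induction fuel with
  | zero => intro l acc h; cases l with
      | nil => simp [PySem.Chars.replace.go]
      | cons c t => simp at h
  | succ n ih =>
    intro l acc h
    cases l with
    | nil => simp [PySem.Chars.replace.go]
    | cons c t =>
      simp only [List.length_cons] at h
      by_cases hc : c = d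
      · subst hc
        have hp : List.isPrefixOf [c] (c :: t) = true := by simp [List.isPrefixOf]
        simp only [PySem.Chars.replace.go, hp, if_pos, List.length_cons, List.length_nil,
          Nat.zero_add, List.drop_succ_cons, List.drop_zero, List.reverse_nil, List.nil_append]
        rw [ih t acc (by omega)]
        simp
      · have hp : List.isPrefixOf [d] (c :: t) = false := by
          simp [List.isPrefixOf]; exact fun h => absurd h.symm hc
        simp only [PySem.Chars.replace.go, hp, Bool.false_eq_true, if_false]
        rw [ih t (c :: acc) (by omega)]
        simp [hc]

lemma replace_single (d : Char) (l : List Char) :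
    PySem.Chars.replace l [d] [] = l.filter (· ≠ d) := by
  simp only [PySem.Chars.replace, List.isEmpty_cons, Bool.false_eq_true, if_false]
  exact go_single d l.length l [] le_rfl

-- s.replace(ds, "") for a one-character pattern ds deletes exactly the occurrences of that character
lemma str_replace_single (s : String) (ds : String) (d : Char) (hd : ds.toList = [d]) :
    (PySem.Str.replace s ds "").toList = s.toList.filter (· ≠ d) := by
  rw [PySem.Str.toList_replace, hd]
  have he : ("" : String).toList = [] := by decide
  rw [he]
  exact replace_single d s.toList

-- the ten replace passes leave exactly the non-digit characters
lemma fold_replace_eq_filter (word : String) :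
    ((["0","1","2","3","4","5","6","7","8","9"] : List String).foldl
        (fun t i => PySem.Str.replace t i "") word).toList
      = word.toList.filter (fun c => !("0123456789".toList.contains c)) := by
  simp only [List.foldl]
  rw [str_replace_single _ _ '9' (by decide), str_replace_single _ _ '8' (by decide),
      str_replace_single _ _ '7' (by decide), str_replace_single _ _ '6' (by decide),
      str_replace_single _ _ '5' (by decide), str_replace_single _ _ '4' (by decide),
      str_replace_single _ _ '3' (by decide), str_replace_single _ _ '2' (by decide),
      str_replace_single _ _ '1' (by decide), str_replace_single _ _ '0' (by decide)]
  simp only [List.filter_filter]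
  apply List.filter_congr
  intro c _
  have h : "0123456789".toList = ['0','1','2','3','4','5','6','7','8','9'] := by decide
  rw [h]
  simp
  ac_rfl

-- ===== VERDICT (by name: the statement is the Claim_ definition above) =====
theorem wd_len_spec : Claim_equal_wd_len := by
  intro word _
  unfold Spec_wd_len wd_len wd_len_alt
  by_cases hw : word == "IdWord"
  · simp [hw]
  · simp only [hw, Bool.false_eq_true]
    rw [PySem.Str.len_eq, fold_replace_eq_filter]
    rw [← List.countP_eq_length_filter]
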